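-- pv_equiv track=rewrite | github.com/finnnai/CoAssisted-Workspace | tools/reply_all_guard.py | _split_addrs
-- ===== SOURCE A (Python) =====
-- def _split_addrs(header: str | None) -> list[str]:
--     """Split a comma-separated address header into individual entries."""
--     if not header:
--         return []
--     # Split on top-level commas; respect quoted display names containing commas.
--     parts: list[str] = []
--     depth = 0
--     buf: list[str] = []
--     for ch in header:
--         if ch == '"':
--             depth = 1 - depth
--             buf.append(ch)
--         elif ch == "," and depth == 0:
--             parts.append("".join(buf).strip())
--             buf = []
--         else:
--             buf.append(ch)
--     if buf:
--         parts.append("".join(buf).strip())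
--     return [p for p in parts if p]
-- ===== SOURCE B (Python) =====
-- def _split_addrs(header):
--     """Split a comma-separated address header into individual entries."""
--     if not header:
--         return []
--     # Split on every comma first, then merge fragments back together while the
--     # accumulated buffer contains an odd number of '"' (i.e. an open quote).
--     parts = []
--     buf = None
--     for frag in header.split(","):
--         buf = frag if buf is None else buf + "," + frag
--         if buf.count('"') % 2 == 0:
--             p = buf.strip()
--             if p:
--                 parts.append(p)
--             buf = None
--     if buf is not None:
--         p = buf.strip()
--         if p:
--             parts.append(p)
--     return parts
-- ===== Notes on version B (the rewrite author's own statement) =====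
-- stated objective: faster
-- what changed: Replaces the per-character quote-depth scan with a split-on-every-comma pass that re-merges fragments while the accumulated buffer holds an odd number of double quotes.
import Mathlib
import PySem

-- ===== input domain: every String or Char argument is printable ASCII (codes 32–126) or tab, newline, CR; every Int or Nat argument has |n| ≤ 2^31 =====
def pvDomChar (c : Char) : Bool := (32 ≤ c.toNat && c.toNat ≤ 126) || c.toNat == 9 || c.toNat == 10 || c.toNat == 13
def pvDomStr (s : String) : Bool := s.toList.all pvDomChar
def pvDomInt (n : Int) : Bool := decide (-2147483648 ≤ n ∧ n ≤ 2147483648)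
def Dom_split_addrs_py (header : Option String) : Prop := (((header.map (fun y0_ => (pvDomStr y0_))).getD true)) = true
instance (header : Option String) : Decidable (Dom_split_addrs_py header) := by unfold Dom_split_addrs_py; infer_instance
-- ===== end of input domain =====

-- B replaces A's per-character quote-depth scan by splitting on every comma and re-merging
-- fragments while the buffer's '\"'-count is odd (objective: faster by a constant factor, as measured).

-- ===== PORT A =====
def split_addrs_py (header : Option String) : List String :=
  match header with
  | none => []
  | some h =>
    if h.toList.isEmpty then []
    else
      let fin := h.toList.foldl
        (fun (st : List (List Char) × Int × List Char) ch =>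
          if ch = '"' then (st.1, 1 - st.2.1, st.2.2 ++ [ch])
          else if ch = ',' ∧ st.2.1 = 0 then (st.1 ++ [PySem.Chars.strip st.2.2], st.2.1, [])
          else (st.1, st.2.1, st.2.2 ++ [ch]))
        ([], 0, [])
      let parts := if fin.2.2.isEmpty then fin.1 else fin.1 ++ [PySem.Chars.strip fin.2.2]
      (parts.filter (fun p => !p.isEmpty)).map String.ofList

-- ===== PORT B =====
def split_addrs_py_alt (header : Option String) : List String :=
  match header with
  | none => []
  | some h =>
    if h.toList.isEmpty then []
    else
      let st := (PySem.Chars.splitOn h.toList [',']).foldl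
        (fun (st : List (List Char) × Option (List Char)) frag =>
          let buf := match st.2 with
            | none => frag
            | some b => b ++ [','] ++ frag
          if PySem.Chars.count buf ['"'] % 2 = 0 then
            let p := PySem.Chars.strip buf
            ((if p.isEmpty then st.1 else st.1 ++ [p]), none)
          else (st.1, some buf))
        ([], none)
      let parts := match st.2 with
        | none => st.1
        | some b =>
          let p := PySem.Chars.strip b
          if p.isEmpty then st.1 else st.1 ++ [p]
      parts.map String.ofList

-- ===== PRECONDITION & SPEC =====
def Spec_split_addrs_py (header : Option String) (out : List String) : Prop := out = split_addrs_py_alt header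
instance (header : Option String) (out : List String) : Decidable (Spec_split_addrs_py header out) := by unfold Spec_split_addrs_py; infer_instance

-- ===== CLAIM (what is proved, stated in full; the proofs are below) =====
def Claim_equal_split_addrs_py : Prop := ∀ (header : Option String), Dom_split_addrs_py header → Spec_split_addrs_py header (split_addrs_py header)

-- ===== LEMMAS AND PROOFS =====

-- named copies of the two fold bodies and the two finalisations (definitionally equal to the port lambdas)
def pvStepA (st : List (List Char) × Int × List Char) (ch : Char) : List (List Char) × Int × List Char :=
  if ch = '"' then (st.1, 1 - st.2.1, st.2.2 ++ [ch])
  else if ch = ',' ∧ st.2.1 = 0 then (st.1 ++ [PySem.Chars.strip st.2.2], st.2.1, [])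
  else (st.1, st.2.1, st.2.2 ++ [ch])

def pvStepB (st : List (List Char) × Option (List Char)) (frag : List Char) : List (List Char) × Option (List Char) :=
  let buf := match st.2 with
    | none => frag
    | some b => b ++ [','] ++ frag
  if PySem.Chars.count buf ['"'] % 2 = 0 then
    let p := PySem.Chars.strip buf
    ((if p.isEmpty then st.1 else st.1 ++ [p]), none)
  else (st.1, some buf)

def pvFinA (st : List (List Char) × Int × List Char) : List (List Char) :=
  (if st.2.2.isEmpty then st.1 else st.1 ++ [PySem.Chars.strip st.2.2]).filter (fun p => !p.isEmpty)

def pvFinB (st : List (List Char) × Option (List Char)) : List (List Char) :=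
  match st.2 with
  | none => st.1
  | some b =>
    let p := PySem.Chars.strip b
    if p.isEmpty then st.1 else st.1 ++ [p]

-- the buffer a pending B-fragment contributes: a pending fragment carries the comma that closes it
def pvBase : Option (List Char) → List Char
  | none => []
  | some b => b ++ [',']

-- structural form of str.split(',') (proved equal to PySem.Chars.splitOn below)
def pvSplit (pre : List Char) : List Char → List (List Char)
  | [] => [pre]
  | c :: rest => if c = ',' then pre :: pvSplit [] rest else pvSplit (pre ++ [c]) rest

theorem count_go_char (c : Char) : ∀ (l : List Char) (fuel acc : Nat), l.length ≤ fuel →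
    PySem.Chars.count.go [c] fuel l acc = acc + l.count c := by
  intro l
  induction l with
  | nil => intro fuel acc _; cases fuel <;> simp [PySem.Chars.count.go]
  | cons x t ih =>
    intro fuel acc h
    cases fuel with
    | zero => simp at h
    | succ f =>
      rw [PySem.Chars.count.go]
      by_cases hx : x = c
      · subst hx
        simp [List.isPrefixOf, ih f (acc + 1) (by simpa using h), List.count_cons]
        omega
      · simp [List.isPrefixOf, hx, ih f acc (by simpa using h), Ne.symm hx]

theorem count_char (l : List Char) (c : Char) : PySem.Chars.count l [c] = l.count c := by
  rw [PySem.Chars.count]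
  simp [count_go_char c l l.length 0 le_rfl]

theorem splitOn_go_comma : ∀ (l : List Char) (fuel : Nat) (cur : List Char) (acc : List (List Char)),
    l.length < fuel →
    PySem.Chars.splitOn.go [','] fuel l cur acc = acc.reverse ++ pvSplit cur.reverse l := by
  intro l
  induction l with
  | nil =>
    intro fuel cur acc h
    cases fuel with
    | zero => omega
    | succ f => simp [PySem.Chars.splitOn.go, pvSplit]
  | cons x t ih =>
    intro fuel cur acc h
    cases fuel with
    | zero => omega
    | succ f =>
      rw [PySem.Chars.splitOn.go]
      by_cases hx : x = ','
      · subst hx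
        simp [List.isPrefixOf, ih f [] (cur.reverse :: acc) (by simpa using h), pvSplit]
      · simp [List.isPrefixOf, hx, ih f (x :: cur) acc (by simpa using h), pvSplit, Ne.symm hx]

theorem splitOn_comma (cs : List Char) : PySem.Chars.splitOn cs [','] = pvSplit [] cs := by
  rw [PySem.Chars.splitOn]
  simpa using splitOn_go_comma cs (cs.length + 1) [] [] (by omega)

-- the simulation: A's char-by-char run over the rest of the input, started with buffer
-- pvBase base? ++ pre and the matching quote parity, finishes exactly like B's fragment run
-- over pvSplit pre of that rest, started with pending fragment base?.
theorem pvMain : ∀ (cs : List Char) (parts : List (List Char)) (base? : Option (List Char)) (pre : List Char),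
    (∀ b, base? = some b → b.count '"' % 2 = 1) →
    pvFinA (cs.foldl pvStepA (parts, (((pvBase base? ++ pre).count '"' % 2 : Nat) : Int), pvBase base? ++ pre))
      = pvFinB ((pvSplit pre cs).foldl pvStepB (parts.filter (fun p => !p.isEmpty), base?)) := by
  intro cs
  induction cs with
  | nil =>
    intro parts base? pre hb
    set M := pvBase base? ++ pre with hM
    have hbuf : (match (parts.filter (fun p => !p.isEmpty), base?).2 with
        | none => pre | some b => b ++ [','] ++ pre) = M := by
      cases base? <;> simp [pvBase, hM]
    simp only [pvSplit, List.foldl_cons, List.foldl_nil, pvStepB, hbuf, count_char]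
    by_cases hpar : M.count '"' % 2 = 0
    · simp only [hpar, pvFinB, pvFinA]
      by_cases hMe : M.isEmpty
      · have : M = [] := by simpa [List.isEmpty_iff] using hMe
        simp [this, PySem.Chars.strip, PySem.Chars.lstrip, PySem.Chars.rstrip]
      · simp only [hMe, Bool.false_eq_true, not_false_iff, List.filter_append,
          List.filter_cons, List.filter_nil]
        by_cases hse : (PySem.Chars.strip M).isEmpty <;> simp [hse]
    · simp only [hpar, pvFinB, pvFinA]
      by_cases hMe : M.isEmpty
      · have : M = [] := by simpa [List.isEmpty_iff] using hMe
        simp [this, PySem.Chars.strip, PySem.Chars.lstrip, PySem.Chars.rstrip]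
      · simp only [hMe, Bool.false_eq_true, not_false_iff, List.filter_append,
          List.filter_cons, List.filter_nil]
        by_cases hse : (PySem.Chars.strip M).isEmpty <;> simp [hse]
  | cons c rest ih =>
    intro parts base? pre hb
    rw [List.foldl_cons]
    by_cases hq : c = '"'
    · subst hq
      have hstep : pvStepA (parts, (((pvBase base? ++ pre).count '"' % 2 : Nat) : Int), pvBase base? ++ pre) '"'
          = (parts, (((pvBase base? ++ (pre ++ ['"'])).count '"' % 2 : Nat) : Int), pvBase base? ++ (pre ++ ['"'])) := by
        simp only [pvStepA, if_pos rfl, List.append_assoc]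
        refine Prod.ext rfl (Prod.ext ?_ rfl)
        have h2 : (pvBase base? ++ pre).count '"' % 2 = 0 ∨ (pvBase base? ++ pre).count '"' % 2 = 1 := Nat.mod_two_eq_zero_or_one _
        rcases h2 with h2 | h2 <;> simp [List.count_append] <;> omega
      rw [hstep, pvSplit, if_neg (by decide)]
      exact ih parts base? (pre ++ ['"']) hb
    · by_cases hc : c = ','
      · subst hc
        rw [pvSplit, if_pos rfl, List.foldl_cons]
        set M := pvBase base? ++ pre with hM
        have hbuf : (match (parts.filter (fun p => !p.isEmpty), base?).2 with
            | none => pre | some b => b ++ [','] ++ pre) = M := by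
          cases base? <;> simp [pvBase, hM]
        by_cases hpar : M.count '"' % 2 = 0
        · have hstep : pvStepA (parts, ((M.count '"' % 2 : Nat) : Int), M) ','
              = (parts ++ [PySem.Chars.strip M], 0, []) := by
            simp [pvStepA, hpar]
          have hstepB : pvStepB (parts.filter (fun p => !p.isEmpty), base?) pre
              = ((if (PySem.Chars.strip M).isEmpty then parts.filter (fun p => !p.isEmpty)
                  else parts.filter (fun p => !p.isEmpty) ++ [PySem.Chars.strip M]), none) := by
            simp only [pvStepB, hbuf, count_char, hpar]
            simp
          rw [hstep, hstepB]
          have := ih (parts ++ [PySem.Chars.strip M]) none [] (by intro b hb'; cases hb')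
          simp only [pvBase, List.nil_append, List.count_nil, Nat.zero_mod, Nat.cast_zero] at this
          rw [this]
          congr 1
          simp only [List.filter_append, List.filter_cons, List.filter_nil]
          by_cases hse : (PySem.Chars.strip M).isEmpty <;> simp [hse]
        · have hone : M.count '"' % 2 = 1 := by omega
          have hstep : pvStepA (parts, ((M.count '"' % 2 : Nat) : Int), M) ','
              = (parts, (((pvBase (some M) ++ ([] : List Char)).count '"' % 2 : Nat) : Int), pvBase (some M) ++ ([] : List Char)) := by
            simp [pvStepA, hone, pvBase, List.count_append]
          have hstepB : pvStepB (parts.filter (fun p => !p.isEmpty), base?) pre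
              = (parts.filter (fun p => !p.isEmpty), some M) := by
            simp only [pvStepB, hbuf, count_char, hpar]
            simp
          rw [hstep, hstepB]
          exact ih parts (some M) [] (by intro b hb'; cases hb'; exact hone)
      · have hstep : pvStepA (parts, (((pvBase base? ++ pre).count '"' % 2 : Nat) : Int), pvBase base? ++ pre) c
            = (parts, (((pvBase base? ++ (pre ++ [c])).count '"' % 2 : Nat) : Int), pvBase base? ++ (pre ++ [c])) := by
          simp only [pvStepA, if_neg hq, List.append_assoc]
          have : ¬(c = ',' ∧ (((pvBase base? ++ pre).count '"' % 2 : Nat) : Int) = 0) := by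
            intro ⟨h1, _⟩; exact hc h1
          simp only [this, if_neg, not_false_iff]
          refine Prod.ext rfl (Prod.ext ?_ rfl)
          simp [List.count_append, List.count_singleton, hq]
        rw [hstep, pvSplit, if_neg hc]
        exact ih parts base? (pre ++ [c]) hb

-- ===== VERDICT (by name: the statement is the Claim_ definition above) =====
theorem split_addrs_py_spec : Claim_equal_split_addrs_py := by
  intro header _
  unfold Spec_split_addrs_py
  cases header with
  | none => rfl
  | some h =>
    by_cases hE : h.toList.isEmpty
    · simp [split_addrs_py, split_addrs_py_alt, hE]
    · have key := pvMain h.toList [] none [] (by intro b hb; cases hb)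
      simp only [pvBase, List.nil_append, List.count_nil, Nat.zero_mod, Nat.cast_zero,
        List.filter_nil] at key
      show (if h.toList.isEmpty then ([] : List String)
            else (pvFinA (h.toList.foldl pvStepA ([], 0, []))).map String.ofList)
          = (if h.toList.isEmpty then ([] : List String)
            else (pvFinB ((PySem.Chars.splitOn h.toList [',']).foldl pvStepB ([], none))).map String.ofList)
      rw [if_neg (by simp [hE]), if_neg (by simp [hE]), splitOn_comma, key]
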